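-- pv_equiv track=rewrite | github.com/ralf-meyer/molSimplify | molSimplify/Scripts/isomers.py | checkallowedbidentates
-- ===== SOURCE A (Python) =====
-- from copy import copy, deepcopy
--
-- def checkallowedbidentates(simple_geometry, geometry):
--     simple_geometry_tmp = copy(simple_geometry)
--
--     # Check if bidentate is in a position where there's nothing to coordinate to
--
--     if geometry in ['oct', 'pbp']:
--         if simple_geometry[-1].endswith('_alphabond') or simple_geometry[-1].endswith('_betabond'):
--             return False
--     if geometry in ['tbp']:
--         if simple_geometry[0].endswith('_alphabond') or simple_geometry[0].endswith('_betabond'):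
--             return False
--
--     for counter, bonds in enumerate(simple_geometry_tmp):
--         if counter > 0:
--             bond_previous = simple_geometry_tmp[counter - 1]
--         else:
--             bond_previous = 'None'
--         if counter < (len(simple_geometry) - 1):
--             bond_next = simple_geometry_tmp[counter + 1]
--         else:
--             bond_next = 'None'
--
--         ligand_name = bonds.split('_')[0]
--
--         if bonds.endswith('_alphabond'):
--             if bond_previous.endswith('_betabond') and bond_previous.startswith(ligand_name):
--                 simple_geometry_tmp[counter] = 'None'
--                 simple_geometry_tmp[counter - 1] = 'None'
--             elif bond_next.endswith('_betabond') and bond_next.startswith(ligand_name):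
--                 simple_geometry_tmp[counter] = 'None'
--                 simple_geometry_tmp[counter + 1] = 'None'
--             else:
--                 return False
--
--         elif bonds.endswith('_betabond'):
--             if bond_previous.endswith('_alphabond') and bond_previous.startswith(ligand_name):
--                 simple_geometry_tmp[counter] = 'None'
--                 simple_geometry_tmp[counter - 1] = 'None'
--             elif bond_next.endswith('_alphabond') and bond_next.startswith(ligand_name):
--                 simple_geometry_tmp[counter] = 'None'
--                 simple_geometry_tmp[counter + 1] = 'None'
--             else:
--                 return False
--     return True
-- ===== SOURCE B (Python) =====
-- def checkallowedbidentates(simple_geometry, geometry):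
--     # Same endpoint guards as the original (incl. IndexError on empty list).
--     if geometry in ['oct', 'pbp']:
--         if simple_geometry[-1].endswith('_alphabond') or simple_geometry[-1].endswith('_betabond'):
--             return False
--     if geometry in ['tbp']:
--         if simple_geometry[0].endswith('_alphabond') or simple_geometry[0].endswith('_betabond'):
--             return False
--     # Forward-only pairing scan: each alpha/beta bond must be immediately
--     # followed by its matching partner; step over the pair.
--     i = 0
--     n = len(simple_geometry)
--     while i < n:
--         s = simple_geometry[i]
--         if s.endswith('_alphabond'):
--             if not _pair_ok(simple_geometry, i, s, '_betabond'):
--                 return False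
--             i += 2
--         elif s.endswith('_betabond'):
--             if not _pair_ok(simple_geometry, i, s, '_alphabond'):
--                 return False
--             i += 2
--         else:
--             i += 1
--     return True
--
--
-- def _pair_ok(simple_geometry, i, s, other):
--     if i + 1 < len(simple_geometry):
--         nxt = simple_geometry[i + 1]
--         return nxt.endswith(other) and nxt.startswith(s.split('_')[0])
--     return False
-- ===== Notes on version B (the rewrite author's own statement) =====
-- stated objective: simpler
-- what changed: Replaced A's copy-and-mutate marking scan (temp list, previous/next lookups, overwriting matched pairs with 'None') by a forward-only index scan that requires each alpha/beta bond to be immediately followed by its matching partner and steps over the pair; A's backward-pairing branches are provably dead, so no temporary list or mutation is needed.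
import Mathlib
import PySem

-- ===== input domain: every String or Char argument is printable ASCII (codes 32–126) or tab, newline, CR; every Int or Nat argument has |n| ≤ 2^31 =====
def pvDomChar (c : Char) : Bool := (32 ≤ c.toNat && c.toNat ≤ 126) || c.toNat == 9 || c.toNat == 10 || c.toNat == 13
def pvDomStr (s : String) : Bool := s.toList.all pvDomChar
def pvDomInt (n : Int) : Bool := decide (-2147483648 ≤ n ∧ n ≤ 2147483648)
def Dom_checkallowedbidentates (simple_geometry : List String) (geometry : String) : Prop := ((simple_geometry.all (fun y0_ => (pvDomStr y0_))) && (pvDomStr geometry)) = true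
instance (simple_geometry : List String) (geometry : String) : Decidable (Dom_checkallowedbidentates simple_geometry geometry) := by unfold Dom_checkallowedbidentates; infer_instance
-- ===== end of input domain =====

-- B replaces A's copy-and-mutate marking scan by a forward-only paired index scan (simpler decomposition, no temp list).

-- ===== PORT A =====
-- shared tiny helpers (used verbatim by both Pythons): s.endswith('_alphabond'/'_betabond'), s.split('_')[0]
def pvSuffixA (s : String) : Bool := PySem.Str.endswith s "_alphabond"
def pvSuffixB (s : String) : Bool := PySem.Str.endswith s "_betabond"
-- s.split('_')[0]; split with a nonempty separator always yields at least one piece, so getD 0 is exact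
def pvLigand (s : String) : String := ((PySem.Str.split? s "_").getD []).getD 0 ""

-- the for-loop of A over the mutated copy simple_geometry_tmp; counter = c
def pvLoopA (tmp : List String) (c : Nat) : Bool :=
  if _h : c < tmp.length then
    let bonds := tmp.getD c ""
    let bond_previous := if c > 0 then tmp.getD (c - 1) "" else "None"
    let bond_next := if c < tmp.length - 1 then tmp.getD (c + 1) "" else "None"
    let ligand_name := pvLigand bonds
    if pvSuffixA bonds then
      if pvSuffixB bond_previous && PySem.Str.startswith bond_previous ligand_name then
        pvLoopA ((tmp.set c "None").set (c - 1) "None") (c + 1)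
      else if pvSuffixB bond_next && PySem.Str.startswith bond_next ligand_name then
        pvLoopA ((tmp.set c "None").set (c + 1) "None") (c + 1)
      else false
    else if pvSuffixB bonds then
      if pvSuffixA bond_previous && PySem.Str.startswith bond_previous ligand_name then
        pvLoopA ((tmp.set c "None").set (c - 1) "None") (c + 1)
      else if pvSuffixA bond_next && PySem.Str.startswith bond_next ligand_name then
        pvLoopA ((tmp.set c "None").set (c + 1) "None") (c + 1)
      else false
    else pvLoopA tmp (c + 1)
  else true
termination_by tmp.length - c
decreasing_by all_goals (try simp only [List.length_set]); all_goals omega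

-- the tbp guard then the loop (list indexing simple_geometry[0] raises on []; Pre_ excludes that)
def pvTailA (simple_geometry : List String) (geometry : String) : Bool :=
  if geometry == "tbp" then
    match PySem.List.pyGet? simple_geometry 0 with
    | none => false  -- Python raises IndexError here; excluded by Pre_
    | some first =>
      if pvSuffixA first || pvSuffixB first then false
      else pvLoopA simple_geometry 0
  else pvLoopA simple_geometry 0

def checkallowedbidentates (simple_geometry : List String) (geometry : String) : Bool :=
  if geometry == "oct" || geometry == "pbp" then
    match PySem.List.pyGet? simple_geometry (-1) with
    | none => false  -- Python raises IndexError here; excluded by Pre_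
    | some last =>
      if pvSuffixA last || pvSuffixB last then false
      else pvTailA simple_geometry geometry
  else pvTailA simple_geometry geometry

-- ===== PORT B =====
-- _pair_ok(simple_geometry, i, s, other)
def pvPairOk (simple_geometry : List String) (i : Nat) (s other : String) : Bool :=
  if i + 1 < simple_geometry.length then
    let nxt := simple_geometry.getD (i + 1) ""
    PySem.Str.endswith nxt other && PySem.Str.startswith nxt (pvLigand s)
  else false

-- the while-loop of B: forward-only pairing, stepping i by 2 over a matched pair
def pvLoopB (simple_geometry : List String) (i : Nat) : Bool :=
  if _h : i < simple_geometry.length then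
    let s := simple_geometry.getD i ""
    if pvSuffixA s then
      if pvPairOk simple_geometry i s "_betabond" then pvLoopB simple_geometry (i + 2) else false
    else if pvSuffixB s then
      if pvPairOk simple_geometry i s "_alphabond" then pvLoopB simple_geometry (i + 2) else false
    else pvLoopB simple_geometry (i + 1)
  else true
termination_by simple_geometry.length - i

def pvTailB (simple_geometry : List String) (geometry : String) : Bool :=
  if geometry == "tbp" then
    match PySem.List.pyGet? simple_geometry 0 with
    | none => false  -- Python raises IndexError here; excluded by Pre_
    | some first =>
      if pvSuffixA first || pvSuffixB first then false
      else pvLoopB simple_geometry 0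
  else pvLoopB simple_geometry 0

def checkallowedbidentates_alt (simple_geometry : List String) (geometry : String) : Bool :=
  if geometry == "oct" || geometry == "pbp" then
    match PySem.List.pyGet? simple_geometry (-1) with
    | none => false  -- Python raises IndexError here; excluded by Pre_
    | some last =>
      if pvSuffixA last || pvSuffixB last then false
      else pvTailB simple_geometry geometry
  else pvTailB simple_geometry geometry

-- ===== PRECONDITION & SPEC =====
-- Pre_ excludes only the inputs where Python A raises IndexError: an empty list with
-- geometry 'oct', 'pbp' or 'tbp' (the endpoint guards index simple_geometry[-1] / [0]).
def Pre_checkallowedbidentates (simple_geometry : List String) (geometry : String) : Prop :=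
  ¬ ((geometry = "oct" ∨ geometry = "pbp" ∨ geometry = "tbp") ∧ simple_geometry = [])
instance (simple_geometry : List String) (geometry : String) : Decidable (Pre_checkallowedbidentates simple_geometry geometry) := by unfold Pre_checkallowedbidentates; infer_instance

def pvWitness_checkallowedbidentates : List String × String := (["x_alphabond", "x_betabond", "Cl"], "oct")

def Spec_checkallowedbidentates (simple_geometry : List String) (geometry : String) (out : Bool) : Prop := out = checkallowedbidentates_alt simple_geometry geometry
instance (simple_geometry : List String) (geometry : String) (out : Bool) : Decidable (Spec_checkallowedbidentates simple_geometry geometry out) := by unfold Spec_checkallowedbidentates; infer_instance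

-- ===== CLAIM (what is proved, stated in full; the proofs are below) =====
def Claim_equal_checkallowedbidentates : Prop := ∀ (simple_geometry : List String) (geometry : String), Dom_checkallowedbidentates simple_geometry geometry → Pre_checkallowedbidentates simple_geometry geometry → Spec_checkallowedbidentates simple_geometry geometry (checkallowedbidentates simple_geometry geometry)

-- ===== LEMMAS AND PROOFS =====

lemma pvGetD_set_ne (l : List String) (i j : Nat) (a : String) (h : i ≠ j) :
    (l.set i a).getD j "" = l.getD j "" := by
  simp [List.getD_eq_getElem?_getD, h]

lemma pvGetD_set_self (l : List String) (i : Nat) (a : String) (h : i < l.length) :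
    (l.set i a).getD i "" = a := by
  simp [List.getD_eq_getElem?_getD, h]

lemma pvLoopA_stop (tmp : List String) (c : Nat) (h : ¬ c < tmp.length) : pvLoopA tmp c = true := by
  rw [pvLoopA]; simp [h]

lemma pvLoopB_stop (sg : List String) (i : Nat) (h : ¬ i < sg.length) : pvLoopB sg i = true := by
  rw [pvLoopB]; simp [h]

-- The core invariant: A's marking scan over the mutated copy equals B's forward pairing scan.
-- "clean" state: tmp agrees with sg from position c on and tmp[c-1] carries no bond suffix;
-- "consumed" state: tmp[c] was overwritten with 'None' by the previous forward match.
lemma pvLoopAB : ∀ (k : Nat) (sg tmp : List String) (c : Nat),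
    tmp.length = sg.length → sg.length - c ≤ k →
    (((∀ j, c ≤ j → tmp.getD j "" = sg.getD j "") →
      (c = 0 ∨ (pvSuffixA (tmp.getD (c - 1) "") = false ∧ pvSuffixB (tmp.getD (c - 1) "") = false)) →
      pvLoopA tmp c = pvLoopB sg c)
    ∧
    (tmp.getD c "" = "None" → (∀ j, c + 1 ≤ j → tmp.getD j "" = sg.getD j "") →
      pvLoopA tmp c = pvLoopB sg (c + 1))) := by
  intro k
  induction k with
  | zero =>
    intro sg tmp c hlen hk
    have hc : ¬ c < tmp.length := by omega
    exact ⟨fun _ _ => by rw [pvLoopA_stop tmp c hc, pvLoopB_stop sg c (by omega)],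
           fun _ _ => by rw [pvLoopA_stop tmp c hc, pvLoopB_stop sg (c + 1) (by omega)]⟩
  | succ k ih =>
    intro sg tmp c hlen hk
    by_cases hc : c < tmp.length
    case neg =>
      exact ⟨fun _ _ => by rw [pvLoopA_stop tmp c hc, pvLoopB_stop sg c (by omega)],
             fun _ _ => by rw [pvLoopA_stop tmp c hc, pvLoopB_stop sg (c + 1) (by omega)]⟩
    case pos =>
    have hcs : c < sg.length := by omega
    have hNa : pvSuffixA "None" = false := by decide
    have hNb : pvSuffixB "None" = false := by decide
    constructor
    · -- clean state
      intro hag hprev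
      have hbonds : tmp.getD c "" = sg.getD c "" := hag c le_rfl
      have hprevA : pvSuffixA (if c > 0 then tmp.getD (c - 1) "" else "None") = false := by
        rcases hprev with h0 | ⟨ha, _⟩
        · simp [h0, hNa]
        · split_ifs with h <;> [exact ha; exact hNa]
      have hprevB : pvSuffixB (if c > 0 then tmp.getD (c - 1) "" else "None") = false := by
        rcases hprev with h0 | ⟨_, hb⟩
        · simp [h0, hNb]
        · split_ifs with h <;> [exact hb; exact hNb]
      rw [pvLoopA]
      simp only [hc, dif_pos, hbonds]
      rw [pvLoopB]
      simp only [hcs, dif_pos]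
      set s := sg.getD c "" with hs
      have hnextB : (pvSuffixB (if c < tmp.length - 1 then tmp.getD (c + 1) "" else "None")
            && PySem.Str.startswith (if c < tmp.length - 1 then tmp.getD (c + 1) "" else "None") (pvLigand s))
          = pvPairOk sg c s "_betabond" := by
        unfold pvPairOk
        by_cases hlt : c + 1 < sg.length
        · have hlt' : c < tmp.length - 1 := by omega
          rw [if_pos hlt, if_pos hlt', hag (c + 1) (by omega)]; rfl
        · have hlt' : ¬ c < tmp.length - 1 := by omega
          rw [if_neg hlt, if_neg hlt', hNb, Bool.false_and]
      have hnextA : (pvSuffixA (if c < tmp.length - 1 then tmp.getD (c + 1) "" else "None")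
            && PySem.Str.startswith (if c < tmp.length - 1 then tmp.getD (c + 1) "" else "None") (pvLigand s))
          = pvPairOk sg c s "_alphabond" := by
        unfold pvPairOk
        by_cases hlt : c + 1 < sg.length
        · have hlt' : c < tmp.length - 1 := by omega
          rw [if_pos hlt, if_pos hlt', hag (c + 1) (by omega)]; rfl
        · have hlt' : ¬ c < tmp.length - 1 := by omega
          rw [if_neg hlt, if_neg hlt', hNa, Bool.false_and]
      simp only [hprevA, hprevB, Bool.false_and, Bool.false_eq_true, if_false, hnextB, hnextA]
      by_cases hA : pvSuffixA s = true
      · simp only [hA, if_true]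
        by_cases hP : pvPairOk sg c s "_betabond" = true
        · simp only [hP, if_true]
          have hlt : c + 1 < sg.length := by
            by_contra h
            unfold pvPairOk at hP
            rw [if_neg h] at hP
            exact absurd hP (by simp)
          have hlen' : ((tmp.set c "None").set (c + 1) "None").length = sg.length := by
            simp [hlen]
          have hcons : ((tmp.set c "None").set (c + 1) "None").getD (c + 1) "" = "None" :=
            pvGetD_set_self _ _ _ (by simp; omega)
          have hag' : ∀ j, (c + 1) + 1 ≤ j →
              ((tmp.set c "None").set (c + 1) "None").getD j "" = sg.getD j "" := by
            intro j hj
            rw [pvGetD_set_ne _ _ _ _ (by omega), pvGetD_set_ne _ _ _ _ (by omega)]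
            exact hag j (by omega)
          exact (ih sg _ (c + 1) hlen' (by omega)).2 hcons hag'
        · simp [hP]
      · simp only [hA, Bool.false_eq_true, if_false]
        by_cases hB : pvSuffixB s = true
        · simp only [hB, if_true]
          by_cases hP : pvPairOk sg c s "_alphabond" = true
          · simp only [hP, if_true]
            have hlt : c + 1 < sg.length := by
              by_contra h
              unfold pvPairOk at hP
              rw [if_neg h] at hP
              exact absurd hP (by simp)
            have hlen' : ((tmp.set c "None").set (c + 1) "None").length = sg.length := by
              simp [hlen]
            have hcons : ((tmp.set c "None").set (c + 1) "None").getD (c + 1) "" = "None" :=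
              pvGetD_set_self _ _ _ (by simp; omega)
            have hag' : ∀ j, (c + 1) + 1 ≤ j →
                ((tmp.set c "None").set (c + 1) "None").getD j "" = sg.getD j "" := by
              intro j hj
              rw [pvGetD_set_ne _ _ _ _ (by omega), pvGetD_set_ne _ _ _ _ (by omega)]
              exact hag j (by omega)
            exact (ih sg _ (c + 1) hlen' (by omega)).2 hcons hag'
          · simp [hP]
        · simp only [hB, Bool.false_eq_true, if_false]
          refine (ih sg tmp (c + 1) hlen (by omega)).1 (fun j hj => hag j (by omega)) (Or.inr ?_)
          have h1 : (c + 1) - 1 = c := by omega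
          rw [h1, hbonds]
          exact ⟨by simpa using hA, by simpa using hB⟩
    · -- consumed state
      intro hcons hag
      rw [pvLoopA]
      simp only [hc, dif_pos, hcons, hNa, hNb, Bool.false_eq_true, if_false]
      refine (ih sg tmp (c + 1) hlen (by omega)).1 hag (Or.inr ?_)
      have h1 : (c + 1) - 1 = c := by omega
      rw [h1, hcons]
      exact ⟨hNa, hNb⟩

lemma pvTail_eq (sg : List String) (g : String) : pvTailA sg g = pvTailB sg g := by
  have hloop : pvLoopA sg 0 = pvLoopB sg 0 :=
    (pvLoopAB sg.length sg sg 0 rfl (by omega)).1 (fun _ _ => rfl) (Or.inl rfl)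
  unfold pvTailA pvTailB
  by_cases hg : (g == "tbp") = true
  · simp only [hg, if_true]
    cases PySem.List.pyGet? sg 0 with
    | none => rfl
    | some first => simp [hloop]
  · simp [hg, hloop]

-- ===== VERDICT (by name: the statement is the Claim_ definition above) =====
theorem checkallowedbidentates_spec : Claim_equal_checkallowedbidentates := by
  intro sg g _ _
  unfold Spec_checkallowedbidentates checkallowedbidentates checkallowedbidentates_alt
  by_cases hg : (g == "oct" || g == "pbp") = true
  · simp only [hg, if_true]
    cases PySem.List.pyGet? sg (-1) with
    | none => rfl
    | some last => simp [pvTail_eq]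
  · simp [hg, pvTail_eq]
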